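-- pv_equiv track=rewrite | github.com/YYYYXL1004/CG-Lab | Lab2/algorithms.py | midpoint_line
-- ===== SOURCE A (Python) =====
-- def midpoint_line(x0, y0, x1, y1):
--     """中点画线法 — 将两点之间的直线离散为像素点列表"""
--     points = []
--     dx = abs(x1 - x0)
--     dy = abs(y1 - y0)
--     step_x = 1 if x0 < x1 else -1
--     step_y = 1 if y0 < y1 else -1
--
--     steep = dy > dx
--     if steep:
--         dx, dy = dy, dx
--
--     d = 2 * dy - dx
--     x, y = x0, y0
--
--     for _ in range(dx + 1):
--         points.append((x, y))
--         if d < 0: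
--             d += 2 * dy
--         else:
--             d += 2 * (dy - dx)
--             if steep:
--                 x += step_x
--             else:
--                 y += step_y
--         if steep:
--             y += step_y
--         else:
--             x += step_x
--
--     return points
-- ===== SOURCE B (Python) =====
-- def midpoint_line(x0, y0, x1, y1):
--     """Closed-form rasterization: each pixel computed directly from its index."""
--     dx = abs(x1 - x0)
--     dy = abs(y1 - y0)
--     step_x = 1 if x0 < x1 else -1
--     step_y = 1 if y0 < y1 else -1
--     steep = dy > dx
--     if steep:
--         dx, dy = dy, dx
--     if dx == 0:
--         return [(x0, y0)]
--     if steep: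
--         return [(x0 + ((2 * dy * i + dx) // (2 * dx)) * step_x, y0 + i * step_y)
--                 for i in range(dx + 1)]
--     return [(x0 + i * step_x, y0 + ((2 * dy * i + dx) // (2 * dx)) * step_y)
--             for i in range(dx + 1)]
-- ===== Notes on version B (the rewrite author's own statement) =====
-- stated objective: alternative
-- what changed: Replaces the incremental midpoint decision variable and per-iteration branching with a closed-form computation of each pixel's minor-axis offset ((2*dy*i+dx)//(2*dx)) directly from its index, building the list by a comprehension over the major-axis index.
import Mathlib
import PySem

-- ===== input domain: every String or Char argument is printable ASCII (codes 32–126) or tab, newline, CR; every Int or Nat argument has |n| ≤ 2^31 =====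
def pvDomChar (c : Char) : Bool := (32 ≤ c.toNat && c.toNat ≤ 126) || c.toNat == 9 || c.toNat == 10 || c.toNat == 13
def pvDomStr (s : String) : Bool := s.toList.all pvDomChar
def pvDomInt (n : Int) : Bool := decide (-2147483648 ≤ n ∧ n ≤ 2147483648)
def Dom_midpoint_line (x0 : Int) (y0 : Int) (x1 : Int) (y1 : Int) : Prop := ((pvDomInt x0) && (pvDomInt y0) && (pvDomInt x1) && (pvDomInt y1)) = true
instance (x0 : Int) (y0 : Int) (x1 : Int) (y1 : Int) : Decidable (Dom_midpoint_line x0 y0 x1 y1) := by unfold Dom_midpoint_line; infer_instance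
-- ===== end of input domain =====

-- B replaces A's running midpoint decision variable by a closed-form per-index offset; same output, same cost.

-- ===== PORT A =====
-- the for-loop of A: state (x, y, d), one recursive call per iteration, branches in source order
def pvALoop (steep : Bool) (sx sy dy dx : Int) : Nat → Int → Int → Int → List (Int × Int)
  | 0, _, _, _ => []
  | n + 1, x, y, d =>
    (x, y) ::
      (if d < 0 then
        -- d += 2*dy; then minor axis unchanged, major axis advances
        (if steep then pvALoop steep sx sy dy dx n x (y + sy) (d + 2 * dy)
         else pvALoop steep sx sy dy dx n (x + sx) y (d + 2 * dy))
      else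
        -- d += 2*(dy-dx); both axes advance
        pvALoop steep sx sy dy dx n (x + sx) (y + sy) (d + 2 * (dy - dx)))

def midpoint_line (x0 : Int) (y0 : Int) (x1 : Int) (y1 : Int) : List (Int × Int) :=
  let dx0 := |x1 - x0|
  let dy0 := |y1 - y0|
  let sx : Int := if x0 < x1 then 1 else -1
  let sy : Int := if y0 < y1 then 1 else -1
  let steep := dy0 > dx0
  let dx := if steep then dy0 else dx0
  let dy := if steep then dx0 else dy0
  pvALoop steep sx sy dy dx (dx.toNat + 1) x0 y0 (2 * dy - dx)

-- ===== PORT B =====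
def midpoint_line_alt (x0 : Int) (y0 : Int) (x1 : Int) (y1 : Int) : List (Int × Int) :=
  let dx0 := |x1 - x0|
  let dy0 := |y1 - y0|
  let sx : Int := if x0 < x1 then 1 else -1
  let sy : Int := if y0 < y1 then 1 else -1
  let steep := dy0 > dx0
  let dx := if steep then dy0 else dx0
  let dy := if steep then dx0 else dy0
  if dx = 0 then [(x0, y0)]
  else if steep then
    (List.range (dx.toNat + 1)).map (fun (i : Nat) =>
      (x0 + (PySem.Int.floordiv (2 * dy * (i : Int) + dx) (2 * dx)) * sx, y0 + (i : Int) * sy))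
  else
    (List.range (dx.toNat + 1)).map (fun (i : Nat) =>
      (x0 + (i : Int) * sx, y0 + (PySem.Int.floordiv (2 * dy * (i : Int) + dx) (2 * dx)) * sy))

-- ===== PRECONDITION & SPEC =====
def Spec_midpoint_line (x0 : Int) (y0 : Int) (x1 : Int) (y1 : Int) (out : List (Int × Int)) : Prop := out = midpoint_line_alt x0 y0 x1 y1
instance (x0 : Int) (y0 : Int) (x1 : Int) (y1 : Int) (out : List (Int × Int)) : Decidable (Spec_midpoint_line x0 y0 x1 y1 out) := by unfold Spec_midpoint_line; infer_instance

-- ===== CLAIM (what is proved, stated in full; the proofs are below) =====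
def Claim_equal_midpoint_line : Prop := ∀ (x0 : Int) (y0 : Int) (x1 : Int) (y1 : Int), Dom_midpoint_line x0 y0 x1 y1 → Spec_midpoint_line x0 y0 x1 y1 (midpoint_line x0 y0 x1 y1)

-- ===== LEMMAS AND PROOFS =====

-- the closed-form minor-axis offset at major index i
def pvC (dy dx i : Int) : Int := PySem.Int.floordiv (2 * dy * i + dx) (2 * dx)

theorem pvC_step (dy dx i : Int) (hdy : 0 ≤ dy) (hdyx : dy ≤ dx) (hdx : 0 < dx) :
    pvC dy dx (i + 1) =
      pvC dy dx i + (if 2 * dy * (i + 1) - dx - 2 * dx * pvC dy dx i < 0 then 0 else 1) := by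
  have hb : (0:Int) < 2 * dx := by omega
  set c := pvC dy dx i with hc
  obtain ⟨h1, h2⟩ := (PySem.Int.floordiv_eq_iff_of_pos hb).mp
    (hc.symm : PySem.Int.floordiv (2 * dy * i + dx) (2 * dx) = c)
  split_ifs with h
  · rw [add_zero]
    refine (PySem.Int.floordiv_eq_iff_of_pos hb).mpr ⟨by nlinarith, by nlinarith⟩
  · refine (PySem.Int.floordiv_eq_iff_of_pos hb).mpr ⟨by nlinarith, by nlinarith⟩

theorem pvALoop_eq (steep : Bool) (sx sy dy dx : Int)
    (hdy : 0 ≤ dy) (hdyx : dy ≤ dx) (hdx : 0 < dx) :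
    ∀ (n : Nat) (i x0 y0 : Int),
      pvALoop steep sx sy dy dx n
        (if steep then x0 + pvC dy dx i * sx else x0 + i * sx)
        (if steep then y0 + i * sy else y0 + pvC dy dx i * sy)
        (2 * dy * (i + 1) - dx - 2 * dx * pvC dy dx i)
      = (List.range n).map (fun (j : Nat) =>
          if steep then (x0 + pvC dy dx (i + (j : Int)) * sx, y0 + (i + (j : Int)) * sy)
          else (x0 + (i + (j : Int)) * sx, y0 + pvC dy dx (i + (j : Int)) * sy)) := by
  intro n
  induction n with
  | zero => intro i x0 y0; simp [pvALoop]
  | succ n ih =>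
    intro i x0 y0
    have hstep := pvC_step dy dx i hdy hdyx hdx
    have hIH := ih (i + 1) x0 y0
    rw [List.range_succ_eq_map, List.map_cons, List.map_map, pvALoop]
    have htail : ∀ L : List (Int × Int),
        L = (List.range n).map (fun (j : Nat) =>
              if steep then (x0 + pvC dy dx ((i+1) + (j : Int)) * sx, y0 + ((i+1) + (j : Int)) * sy)
              else (x0 + ((i+1) + (j : Int)) * sx, y0 + pvC dy dx ((i+1) + (j : Int)) * sy)) →
        L = List.map ((fun (j : Nat) =>
              if steep then (x0 + pvC dy dx (i + (j : Int)) * sx, y0 + (i + (j : Int)) * sy)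
              else (x0 + (i + (j : Int)) * sx, y0 + pvC dy dx (i + (j : Int)) * sy)) ∘ Nat.succ)
            (List.range n) := by
      intro L hL
      rw [hL]
      refine List.map_congr_left (fun j hj => ?_)
      have h1 : (i + 1) + (j : Int) = i + ((j : Nat).succ : Int) := by push_cast; ring
      simp only [Function.comp, h1]
    by_cases hd : 2 * dy * (i + 1) - dx - 2 * dx * pvC dy dx i < 0
    · rw [if_pos hd] at *
      have hcc : pvC dy dx (i + 1) = pvC dy dx i := by rw [hstep]; ring
      cases steep with
      | true =>
        simp only [if_true, Nat.cast_zero]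
        congr 1
        · simp
        · apply htail
          calc pvALoop true sx sy dy dx n (x0 + pvC dy dx i * sx) (y0 + i * sy + sy)
                (2 * dy * (i + 1) - dx - 2 * dx * pvC dy dx i + 2 * dy)
              = pvALoop true sx sy dy dx n (x0 + pvC dy dx (i+1) * sx) (y0 + (i+1) * sy)
                (2 * dy * ((i+1) + 1) - dx - 2 * dx * pvC dy dx (i+1)) := by
                rw [hcc]; ring_nf
            _ = _ := by
                have := ih (i + 1) x0 y0
                simpa using this
      | false =>
        simp only [if_false, Bool.false_eq_true, Nat.cast_zero]
        congr 1
        · simp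
        · apply htail
          calc pvALoop false sx sy dy dx n (x0 + i * sx + sx) (y0 + pvC dy dx i * sy)
                (2 * dy * (i + 1) - dx - 2 * dx * pvC dy dx i + 2 * dy)
              = pvALoop false sx sy dy dx n (x0 + (i+1) * sx) (y0 + pvC dy dx (i+1) * sy)
                (2 * dy * ((i+1) + 1) - dx - 2 * dx * pvC dy dx (i+1)) := by
                rw [hcc]; ring_nf
            _ = _ := by
                have := ih (i + 1) x0 y0
                simpa using this
    · rw [if_neg hd] at *
      have hcc : pvC dy dx (i + 1) = pvC dy dx i + 1 := by rw [hstep]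
      cases steep with
      | true =>
        simp only [if_true, Nat.cast_zero]
        congr 1
        · simp
        · apply htail
          calc pvALoop true sx sy dy dx n (x0 + pvC dy dx i * sx + sx) (y0 + i * sy + sy)
                (2 * dy * (i + 1) - dx - 2 * dx * pvC dy dx i + 2 * (dy - dx))
              = pvALoop true sx sy dy dx n (x0 + pvC dy dx (i+1) * sx) (y0 + (i+1) * sy)
                (2 * dy * ((i+1) + 1) - dx - 2 * dx * pvC dy dx (i+1)) := by
                rw [hcc]; ring_nf
            _ = _ := by
                have := ih (i + 1) x0 y0
                simpa using this
      | false =>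
        simp only [if_false, Bool.false_eq_true, Nat.cast_zero]
        congr 1
        · simp
        · apply htail
          calc pvALoop false sx sy dy dx n (x0 + i * sx + sx) (y0 + pvC dy dx i * sy + sy)
                (2 * dy * (i + 1) - dx - 2 * dx * pvC dy dx i + 2 * (dy - dx))
              = pvALoop false sx sy dy dx n (x0 + (i+1) * sx) (y0 + pvC dy dx (i+1) * sy)
                (2 * dy * ((i+1) + 1) - dx - 2 * dx * pvC dy dx (i+1)) := by
                rw [hcc]; ring_nf
            _ = _ := by
                have := ih (i + 1) x0 y0
                simpa using this

theorem pvALoop_closed (steep : Bool) (sx sy dy dx x0 y0 : Int)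
    (hdy : 0 ≤ dy) (hdyx : dy ≤ dx) (hdx : 0 < dx) :
    pvALoop steep sx sy dy dx (dx.toNat + 1) x0 y0 (2 * dy - dx)
      = (List.range (dx.toNat + 1)).map (fun (i : Nat) =>
          if steep then
            (x0 + (PySem.Int.floordiv (2 * dy * (i : Int) + dx) (2 * dx)) * sx, y0 + (i : Int) * sy)
          else
            (x0 + (i : Int) * sx, y0 + (PySem.Int.floordiv (2 * dy * (i : Int) + dx) (2 * dx)) * sy)) := by
  have hfd0 : PySem.Int.floordiv dx (2 * dx) = 0 :=
    (PySem.Int.floordiv_eq_iff_of_pos (by omega)).mpr ⟨by nlinarith, by nlinarith⟩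
  have key := pvALoop_eq steep sx sy dy dx hdy hdyx hdx (dx.toNat + 1) 0 x0 y0
  simp only [pvC, zero_add, zero_mul, mul_zero, mul_one, add_zero] at key
  simp only [hfd0, mul_zero, zero_mul, add_zero, sub_zero, ite_self] at key
  exact key

-- ===== VERDICT (by name: the statement is the Claim_ definition above) =====
theorem midpoint_line_spec : Claim_equal_midpoint_line := by
  intro x0 y0 x1 y1 _
  show midpoint_line x0 y0 x1 y1 = midpoint_line_alt x0 y0 x1 y1
  unfold midpoint_line midpoint_line_alt
  by_cases hs : |x1 - x0| < |y1 - y0|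
  · -- steep: dx = |y1-y0| > |x1-x0| = dy ≥ 0
    have h0 : (0:Int) ≤ |x1 - x0| := abs_nonneg _
    have hne : ¬ (|y1 - y0| = 0) := by omega
    simp only [gt_iff_lt, hs, decide_true, if_true, hne, if_false]
    have := pvALoop_closed true (if x0 < x1 then 1 else -1) (if y0 < y1 then 1 else -1)
      |x1 - x0| |y1 - y0| x0 y0 h0 (le_of_lt hs) (by omega)
    simpa using this
  · -- not steep: dy = |y1-y0| ≤ |x1-x0| = dx
    have h0 : (0:Int) ≤ |y1 - y0| := abs_nonneg _
    have hle : |y1 - y0| ≤ |x1 - x0| := by omega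
    simp only [gt_iff_lt, hs, decide_false, if_false]
    by_cases hz : |x1 - x0| = 0
    · have hz2 : |y1 - y0| = 0 := by omega
      simp [hz, hz2, pvALoop]
    · simp only [hz, if_false]
      have := pvALoop_closed false (if x0 < x1 then 1 else -1) (if y0 < y1 then 1 else -1)
        |y1 - y0| |x1 - x0| x0 y0 h0 hle (by omega)
      simpa using this
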